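-- pv_equiv track=rewrite | github.com/avishek376/Scaler-Problem-Solving | Advanced/19 Advanced DSA : Hashing - 2/Assignment/Q2. Replicating Substring/Q2. Replicating Substring.py | solve
-- ===== SOURCE A (Python) =====
-- def solve(A, B):
--     n = len(B)
--     map = {}
--     for i in range(n):
--         if B[i] not in map:
--             map[B[i]] = 1
--         else:
--             map[B[i]] += 1
--
--     for k in map:
--         if map[k] % A != 0:
--             return -1
--     return 1
-- ===== SOURCE B (Python) =====
-- def solve(A, B):
--     rest = list(B)
--     while rest:
--         c = rest[0]
--         if rest.count(c) % A != 0: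
--             return -1
--         rest = [x for x in rest if x != c]
--     return 1
-- ===== Notes on version B (the rewrite author's own statement) =====
-- stated objective: alternative
-- what changed: Replaces the dict-building pass plus key-scan with a shrinking-list partition loop: take the first remaining character, count it with list.count, test divisibility, and filter it out; no dictionary at all (C-level count/filter per distinct char instead of per-char Python dict ops).
import Mathlib
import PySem

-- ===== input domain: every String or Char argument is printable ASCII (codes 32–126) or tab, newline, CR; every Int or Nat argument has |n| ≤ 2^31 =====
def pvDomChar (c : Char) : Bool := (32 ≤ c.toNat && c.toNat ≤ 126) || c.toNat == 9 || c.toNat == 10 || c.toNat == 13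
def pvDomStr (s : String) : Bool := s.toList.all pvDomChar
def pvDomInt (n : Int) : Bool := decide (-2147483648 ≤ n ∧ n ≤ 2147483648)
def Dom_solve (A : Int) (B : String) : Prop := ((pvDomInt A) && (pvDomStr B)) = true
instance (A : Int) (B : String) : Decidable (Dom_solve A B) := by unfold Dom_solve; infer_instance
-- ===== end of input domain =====

-- B replaces A's dict-count-then-scan with a shrinking-list partition loop (count first char, filter it out); alternative decomposition, no speed claim.


-- ===== PORT A =====
-- second loop of A: first key with count % A != 0 returns -1, else 1
def solveKeysGo (A : Int) (m : PySem.Dict Char Int) : List Char → Int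
  | [] => 1
  | k :: ks => if PySem.Int.mod (m.getD k 0) A ≠ 0 then -1 else solveKeysGo A m ks

def solve (A : Int) (B : String) : Int :=
  let n : Int := PySem.Str.len B
  let m : PySem.Dict Char Int :=
    (PySem.List.pyRange 0 n 1).foldl
      (fun d i =>
        let c := PySem.List.pyGetD B.toList i ' '
        if d.contains c = false then d.insert c 1 else d.insert c (d.getD c 0 + 1))
      PySem.Dict.empty
  solveKeysGo A m m.keys

-- ===== PORT B =====
-- while rest: count first char, test % A, filter it out
def solveAltGo (A : Int) : List Char → Int
  | [] => 1
  | c :: rest =>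
      if PySem.Int.mod (((c :: rest).count c : Nat) : Int) A ≠ 0 then -1
      else solveAltGo A ((c :: rest).filter (fun x => x ≠ c))
  termination_by l => l.length
  decreasing_by
    simp only [List.filter_cons, decide_eq_true_eq]
    have := List.length_filter_le (fun x => decide (x ≠ c)) rest
    simp at *
    omega

def solve_alt (A : Int) (B : String) : Int := solveAltGo A B.toList

-- ===== PRECONDITION & SPEC =====
-- Pre_ excludes exactly A = 0 with nonempty B, where both Pythons raise ZeroDivisionError.
def Pre_solve (A : Int) (B : String) : Prop := A ≠ 0 ∨ B.toList = []
instance (A : Int) (B : String) : Decidable (Pre_solve A B) := by unfold Pre_solve; infer_instance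
def pvWitness_solve : Int × String := (2, "aabb")
def Spec_solve (A : Int) (B : String) (out : Int) : Prop := out = solve_alt A B
instance (A : Int) (B : String) (out : Int) : Decidable (Spec_solve A B out) := by unfold Spec_solve; infer_instance

-- ===== CLAIM (what is proved, stated in full; the proofs are below) =====
def Claim_equal_solve : Prop := ∀ (A : Int) (B : String), Dom_solve A B → Pre_solve A B → Spec_solve A B (solve A B)

-- ===== LEMMAS AND PROOFS =====

-- A's key scan returns 1 iff every listed key has a divisible count
theorem solveKeysGo_eq (A : Int) (m : PySem.Dict Char Int) (ks : List Char) :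
    solveKeysGo A m ks = if ∀ k ∈ ks, PySem.Int.mod (m.getD k 0) A = 0 then 1 else -1 := by
  induction ks with
  | nil => simp [solveKeysGo]
  | cons k ks ih =>
    simp only [solveKeysGo, ih]
    by_cases h : PySem.Int.mod (m.getD k 0) A = 0 <;> simp [h]

-- B's partition loop returns 1 iff every character's count in the remaining list is divisible
theorem solveAltGo_eq (A : Int) (l : List Char) :
    solveAltGo A l = if ∀ c ∈ l, PySem.Int.mod ((l.count c : Nat) : Int) A = 0 then 1 else -1 := by
  induction l using solveAltGo.induct A with
  | case1 => simp [solveAltGo]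
  | case2 c rest hbad =>
    rw [solveAltGo]
    rw [if_pos hbad]
    have hno : ¬ (∀ x ∈ c :: rest, PySem.Int.mod (((c :: rest).count x : Nat) : Int) A = 0) := by
      intro hall; exact hbad (hall c (by simp))
    rw [if_neg hno]
  | case3 c rest hok ih =>
    rw [solveAltGo]
    simp only [hok, if_false]
    rw [ih]
    have hc : PySem.Int.mod (((c :: rest).count c : Nat) : Int) A = 0 := by
      by_contra h; exact hok h
    have hcount : ∀ x, x ≠ c →
        ((c :: rest).filter (fun y => y ≠ c)).count x = (c :: rest).count x := by
      intro x hx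
      rw [List.count_filter]
      simp [hx]
    have hmem : ∀ x, x ∈ (c :: rest).filter (fun y => y ≠ c) ↔ (x ∈ c :: rest ∧ x ≠ c) := by
      intro x; simp [List.mem_filter]; tauto
    split_ifs with h1 h2 h2 <;> try rfl
    · exfalso; apply h2
      intro x hxmem
      by_cases hx : x = c
      · subst hx; exact hc
      · rw [← hcount x hx]
        exact h1 x ((hmem x).2 ⟨hxmem, hx⟩)
    · exfalso; apply h1
      intro x hxmem
      have hx : x ≠ c := ((hmem x).1 hxmem).2
      rw [hcount x hx]
      exact h2 x ((hmem x).1 hxmem).1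

-- A's counting loop builds exactly Counter(B)
theorem solve_counter (B : String) :
    (PySem.List.pyRange 0 (PySem.Str.len B) 1).foldl
      (fun d i =>
        let c := PySem.List.pyGetD B.toList i ' '
        if d.contains c = false then d.insert c 1 else d.insert c (d.getD c 0 + 1))
      PySem.Dict.empty = PySem.Dict.counter B.toList := by
  have hfun : (fun (d : PySem.Dict Char Int) (c : Char) =>
      if d.contains c = false then d.insert c 1 else d.insert c (d.getD c 0 + 1))
      = fun d c => d.insert c (d.getD c 0 + 1) := by
    funext d c
    by_cases h : d.contains c = false
    · rw [if_pos h, PySem.Dict.getD_of_not_contains d 0 h]; norm_num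
    · rw [if_neg h]
  have h1 := PySem.List.foldl_pyRange_zero_pyGetD' B.toList ' '
      (fun (d : PySem.Dict Char Int) c =>
        if d.contains c = false then d.insert c 1 else d.insert c (d.getD c 0 + 1))
      PySem.Dict.empty
  have h2 : B.toList.foldl
      (fun d c => if d.contains c = false then d.insert c 1 else d.insert c (d.getD c 0 + 1))
      PySem.Dict.empty = PySem.Dict.counter B.toList := by
    rw [hfun]; exact PySem.Dict.foldl_insert_getD_add_one_eq_counter B.toList
  simp only [PySem.Str.len_eq]
  exact h1.trans h2

-- ===== VERDICT (by name: the statement is the Claim_ definition above) =====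
theorem solve_spec : Claim_equal_solve := by
  intro A B _ _
  unfold Spec_solve solve solve_alt
  simp only [solve_counter B, solveKeysGo_eq, solveAltGo_eq]
  have hkeys : ∀ k, k ∈ (PySem.Dict.counter B.toList).keys ↔ k ∈ B.toList := by
    intro k
    rw [PySem.Dict.keys_counter]
    exact PySem.Set.mem_ofList B.toList k
  have hcnt : ∀ k, (PySem.Dict.counter B.toList).getD k 0 = ((B.toList.count k : Nat) : Int) :=
    fun k => PySem.Dict.getD_counter B.toList k
  split_ifs with h1 h2 h2 <;> try rfl
  · exact absurd (fun k hk => by rw [← hcnt k]; exact h1 k ((hkeys k).2 hk)) h2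
  · exact absurd (fun k hk => by rw [hcnt k]; exact h2 k ((hkeys k).1 hk)) h1
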